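-- pv_equiv track=rewrite | github.com/cardosopab/LeetCodeNotes | 2024/04/1915.py | wounderfulSubstrings
-- ===== SOURCE A (Python) =====
-- def wounderfulSubstrings(word: str) -> int:
--     counts = [0] * 1024
--     res, mask = 0, 0
--
--     counts[0] = 1
--
--     for i in range(len(word)):
--         mask ^= (1 << (ord(word[i]) - ord('a')))
--         res += counts[mask]
--         for j in range(10):
--             res += counts[mask ^ (1 << j)]
--         counts[mask] += 1
--     return res
-- ===== SOURCE B (Python) =====
-- def wounderfulSubstrings(word: str) -> int:
--     res = 0
--     n = len(word)
--     for i in range(n):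
--         mask = 0
--         for c in word[i:]:
--             mask ^= 1 << (ord(c) - ord('a'))
--             if mask & (mask - 1) == 0:
--                 res += 1
--     return res
-- ===== Notes on version B (the rewrite author's own statement) =====
-- stated objective: simpler
-- what changed: B drops the 1024-entry prefix-mask frequency table entirely and instead rescans: for each start index it sweeps forward maintaining one parity mask and counts positions where the mask has at most one set bit (mask & (mask-1) == 0).
import Mathlib
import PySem

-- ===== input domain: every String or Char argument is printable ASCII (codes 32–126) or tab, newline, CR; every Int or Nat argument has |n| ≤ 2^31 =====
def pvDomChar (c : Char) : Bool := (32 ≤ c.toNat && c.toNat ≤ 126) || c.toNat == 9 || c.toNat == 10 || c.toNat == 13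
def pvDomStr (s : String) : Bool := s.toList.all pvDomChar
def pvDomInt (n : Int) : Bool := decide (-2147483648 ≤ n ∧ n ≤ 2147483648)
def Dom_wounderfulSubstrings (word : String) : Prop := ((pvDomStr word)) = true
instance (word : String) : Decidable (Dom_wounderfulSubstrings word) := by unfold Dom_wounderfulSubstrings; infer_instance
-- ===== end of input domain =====

-- B replaces A's 1024-entry prefix-mask frequency table with a plain double loop that rescans
-- each substring once, keeping a single parity mask and testing mask & (mask-1) == 0 (simpler, no table).

-- ===== PORT A =====
-- 1 << (ord(c) - 97); Nat subtraction: exact for letters at or beyond code 97 (below, Python raises ValueError, excluded by Pre_)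
def pvBit (c : Char) : Nat := 1 <<< (c.toNat - 97)

-- one iteration of A's `for i in range(len(word))` loop; state = (counts, res, mask).
-- counts[x] ports as List.getD/List.set: exact while indices stay < 1024 (Pre_; Python raises IndexError beyond).
def pvStepA (st : List Int × Int × Nat) (c : Char) : List Int × Int × Nat :=
  let counts := st.1
  let mask := st.2.2 ^^^ pvBit c
  let res := st.2.1 + counts.getD mask 0
  let res := (List.range 10).foldl (fun r j => r + counts.getD (mask ^^^ (1 <<< j)) 0) res
  (counts.set mask (counts.getD mask 0 + 1), res, mask)

def wounderfulSubstrings (word : String) : Int :=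
  (word.toList.foldl pvStepA ((List.replicate 1024 (0 : Int)).set 0 1, 0, 0)).2.1

-- ===== PORT B =====
-- inner `for c in word[i:]` loop; state = (mask, res)
def pvStepB (st : Nat × Int) (c : Char) : Nat × Int :=
  let mask := st.1 ^^^ pvBit c
  (mask, if mask &&& (mask - 1) == 0 then st.2 + 1 else st.2)

def wounderfulSubstrings_alt (word : String) : Int :=
  let cs := word.toList
  (List.range cs.length).foldl (fun res i => ((cs.drop i).foldl pvStepB (0, res)).2) 0

-- ===== PRECONDITION & SPEC =====
-- Pre_ = exactly the inputs where Python A returns: every character has code 97..106 (the first ten lowercase letters);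
-- below that range A raises ValueError on the negative shift, above it IndexError on counts[mask].
def Pre_wounderfulSubstrings (word : String) : Prop :=
  (word.toList.all (fun c => 97 ≤ c.toNat && c.toNat ≤ 106)) = true

instance (word : String) : Decidable (Pre_wounderfulSubstrings word) := by
  unfold Pre_wounderfulSubstrings; infer_instance

def pvWitness_wounderfulSubstrings : String := "abaj"

def Spec_wounderfulSubstrings (word : String) (out : Int) : Prop := out = wounderfulSubstrings_alt word
instance (word : String) (out : Int) : Decidable (Spec_wounderfulSubstrings word out) := by
  unfold Spec_wounderfulSubstrings; infer_instance

-- ===== CLAIM (what is proved, stated in full; the proofs are below) =====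
def Claim_equal_wounderfulSubstrings : Prop := ∀ (word : String), Dom_wounderfulSubstrings word → Pre_wounderfulSubstrings word → Spec_wounderfulSubstrings word (wounderfulSubstrings word)

-- ===== LEMMAS AND PROOFS =====

-- characters with code 97..106
def pvAJ (c : Char) : Prop := 97 ≤ c.toNat ∧ c.toNat ≤ 106

lemma pvPre_iff (word : String) : Pre_wounderfulSubstrings word ↔ ∀ c ∈ word.toList, pvAJ c := by
  unfold Pre_wounderfulSubstrings pvAJ
  simp [List.all_eq_true]

-- B's test as a predicate
def pvGood (m : Nat) : Bool := m &&& (m - 1) == 0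

-- indicator that history mask h "matches" current prefix mask m, in A's form
def pvPhi (h m : Nat) : Int :=
  (if h = m then 1 else 0) + ((List.range 10).map (fun j => if h = m ^^^ (1 <<< j) then (1 : Int) else 0)).sum

-- A's counting, abstracted: history list hs of earlier prefix masks (current included), current mask
def pvAC : List Char → List Nat → Nat → Int
  | [], _, _ => 0
  | c :: t, hs, mask =>
      let m := mask ^^^ pvBit c
      (hs.map (pvPhi · m)).sum + pvAC t (m :: hs) m

-- matches of one fixed history mask h against the prefixes of t (starting mask m0)
def pvF : List Char → Nat → Nat → Int
  | [], _, _ => 0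
  | c :: t, m0, h => pvPhi h (m0 ^^^ pvBit c) + pvF t (m0 ^^^ pvBit c) h

-- B's inner-loop count
def pvG : List Char → Nat → Int
  | [], _ => 0
  | c :: t, m => (if pvGood (m ^^^ pvBit c) then 1 else 0) + pvG t (m ^^^ pvBit c)

-- B's total
def pvS : List Char → Int
  | [] => 0
  | c :: t => pvG (c :: t) 0 + pvS t

lemma pv_xor_eq_iff (a b v : Nat) : a = b ^^^ v ↔ a ^^^ b = v := by
  constructor
  · rintro rfl; rw [Nat.xor_comm b v, Nat.xor_assoc, Nat.xor_self, Nat.xor_zero]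
  · rintro rfl; rw [Nat.xor_comm a b, ← Nat.xor_assoc, Nat.xor_self, Nat.zero_xor]

lemma pv_xor_cancel_right (a b d : Nat) : a ^^^ d = b ^^^ d ↔ a = b := by
  constructor
  · intro e
    have := congrArg (· ^^^ d) e
    simpa [Nat.xor_assoc] using this
  · rintro rfl; rfl

lemma pv_xor_right_comm (a b c : Nat) : a ^^^ b ^^^ c = a ^^^ c ^^^ b := by
  rw [Nat.xor_assoc, Nat.xor_assoc, Nat.xor_comm b c]

lemma pvPhi_xor (h m d : Nat) : pvPhi (h ^^^ d) (m ^^^ d) = pvPhi h m := by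
  unfold pvPhi
  have e1 : (h ^^^ d = m ^^^ d) = (h = m) := propext (pv_xor_cancel_right h m d)
  have e2 : ∀ v : Nat, (h ^^^ d = m ^^^ d ^^^ v) = (h = m ^^^ v) := by
    intro v
    rw [pv_xor_right_comm m d v]
    exact propext (pv_xor_cancel_right h (m ^^^ v) d)
  simp only [e1, e2]

set_option maxRecDepth 8192 in
lemma pvPsi_good : ∀ x : Nat, x < 1024 →
    ((if x = 0 then (1 : Int) else 0) +
      ((List.range 10).map (fun j => if x = 1 <<< j then (1 : Int) else 0)).sum)
      = if pvGood x then 1 else 0 := by decide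

lemma pvPhi_good (h m : Nat) (hh : h < 1024) (hm : m < 1024) :
    pvPhi h m = if pvGood (h ^^^ m) then 1 else 0 := by
  unfold pvPhi
  have e0 : (h = m) ↔ (h ^^^ m = 0) := by
    constructor
    · rintro rfl; exact Nat.xor_self h
    · intro e; exact Nat.eq_of_xor_eq_zero e
  have e2 : ∀ v : Nat, (h = m ^^^ v) ↔ (h ^^^ m = v) := fun v => pv_xor_eq_iff h m v
  simp only [e0, e2]
  exact pvPsi_good (h ^^^ m) (by
    have : (1024 : Nat) = 2 ^ 10 := by norm_num
    rw [this] at *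
    exact Nat.xor_lt_two_pow hh hm)

lemma pvAC_hist (t : List Char) : ∀ hs m0, pvAC t hs m0 = (hs.map (pvF t m0 ·)).sum + pvAC t [] m0 := by
  induction t with
  | nil => intro hs m0; simp [pvAC, pvF]
  | cons c t ih =>
      intro hs m0
      simp only [pvAC, pvF]
      rw [ih ((m0 ^^^ pvBit c) :: hs) (m0 ^^^ pvBit c), ih ([m0 ^^^ pvBit c]) (m0 ^^^ pvBit c)]
      simp only [List.map_cons, List.sum_cons, List.map_nil, List.sum_nil]
      rw [PySem.List.sum_map_add_int hs (fun h => pvPhi h (m0 ^^^ pvBit c)) (fun h => pvF t (m0 ^^^ pvBit c) h)]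
      ring

lemma pvAC_xor (t : List Char) : ∀ hs m0 d, pvAC t (hs.map (· ^^^ d)) (m0 ^^^ d) = pvAC t hs m0 := by
  induction t with
  | nil => intro hs m0 d; simp [pvAC]
  | cons c t ih =>
      intro hs m0 d
      simp only [pvAC]
      rw [show m0 ^^^ d ^^^ pvBit c = (m0 ^^^ pvBit c) ^^^ d from pv_xor_right_comm m0 d (pvBit c)]
      have hmap : (hs.map (· ^^^ d)).map (pvPhi · ((m0 ^^^ pvBit c) ^^^ d)) = hs.map (pvPhi · (m0 ^^^ pvBit c)) := by
        rw [List.map_map]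
        exact List.map_congr_left (fun h _ => pvPhi_xor h (m0 ^^^ pvBit c) d)
      rw [hmap]
      have : ((m0 ^^^ pvBit c) ^^^ d) :: hs.map (· ^^^ d) = ((m0 ^^^ pvBit c) :: hs).map (· ^^^ d) := by
        simp
      rw [this, ih ((m0 ^^^ pvBit c) :: hs) (m0 ^^^ pvBit c) d]

lemma pvAC_cons (c : Char) (t : List Char) :
    pvAC (c :: t) [0] 0 = pvF (c :: t) 0 0 + pvAC t [0] 0 := by
  have hm : (0 : Nat) ^^^ pvBit c = pvBit c := Nat.zero_xor _
  simp only [pvAC, pvF, hm, List.map_cons, List.map_nil, List.sum_cons, List.sum_nil]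
  have htr : pvAC t [pvBit c] (pvBit c) = pvAC t [0] 0 := by
    have := pvAC_xor t [0] 0 (pvBit c)
    simpa [Nat.zero_xor] using this
  rw [pvAC_hist t [pvBit c, 0] (pvBit c), ← htr, pvAC_hist t [pvBit c] (pvBit c)]
  simp only [List.map_cons, List.map_nil, List.sum_cons, List.sum_nil]
  ring

lemma pvBit_lt (c : Char) (h : pvAJ c) : pvBit c < 1024 := by
  obtain ⟨h1, h2⟩ := h
  unfold pvBit
  rw [Nat.shiftLeft_eq, one_mul]
  calc 2 ^ (c.toNat - 97) ≤ 2 ^ 9 := Nat.pow_le_pow_right (by norm_num) (by omega)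
    _ < 1024 := by norm_num

lemma pv_xor_lt (a b : Nat) (ha : a < 1024) (hb : b < 1024) : a ^^^ b < 1024 := by
  have e : (1024 : Nat) = 2 ^ 10 := by norm_num
  rw [e] at ha hb ⊢
  exact Nat.xor_lt_two_pow ha hb

lemma pvF_eq_pvG (l : List Char) : ∀ m0 h, (∀ c ∈ l, pvAJ c) → m0 < 1024 → h < 1024 →
    pvF l m0 h = pvG l (h ^^^ m0) := by
  induction l with
  | nil => intro m0 h _ _ _; rfl
  | cons c t ih =>
      intro m0 h haj hm0 hh
      have hc : pvAJ c := haj c (List.mem_cons_self ..)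
      have hb : pvBit c < 1024 := pvBit_lt c hc
      have hm' : m0 ^^^ pvBit c < 1024 := pv_xor_lt _ _ hm0 hb
      simp only [pvF, pvG]
      rw [pvPhi_good h (m0 ^^^ pvBit c) hh hm',
          ih (m0 ^^^ pvBit c) h (fun c hc => haj c (List.mem_cons_of_mem _ hc)) hm' hh,
          Nat.xor_assoc]

lemma pvAC_eq_pvS (cs : List Char) (h : ∀ c ∈ cs, pvAJ c) : pvAC cs [0] 0 = pvS cs := by
  induction cs with
  | nil => rfl
  | cons c t ih =>
      rw [pvAC_cons c t, ih (fun c hc => h c (List.mem_cons_of_mem _ hc))]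
      have : pvF (c :: t) 0 0 = pvG (c :: t) 0 := by
        have := pvF_eq_pvG (c :: t) 0 0 h (by norm_num) (by norm_num)
        simpa using this
      rw [this]; rfl

lemma pv_count_phi (hs : List Nat) (m : Nat) :
    (hs.count m : Int) + ((List.range 10).map (fun j => (hs.count (m ^^^ (1 <<< j)) : Int))).sum
      = (hs.map (pvPhi · m)).sum := by
  induction hs with
  | nil => simp
  | cons h hs ih =>
      simp only [List.count_cons, List.map_cons, List.sum_cons, beq_iff_eq,
        Nat.cast_add, Nat.cast_ite, Nat.cast_one, Nat.cast_zero]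
      rw [PySem.List.sum_map_add_int (List.range 10)
            (fun j => (hs.count (m ^^^ (1 <<< j)) : Int))
            (fun j => if h = m ^^^ (1 <<< j) then (1 : Int) else 0)]
      rw [show pvPhi h m = (if h = m then (1 : Int) else 0) +
            ((List.range 10).map (fun j => if h = m ^^^ (1 <<< j) then (1 : Int) else 0)).sum from rfl]
      rw [← ih]
      ring

lemma pv_getD_set (l : List Int) (i : Nat) (v : Int) (j : Nat) (h : i < l.length) :
    (l.set i v).getD j 0 = if i = j then v else l.getD j 0 := by
  simp only [List.getD_eq_getElem?_getD, List.getElem?_set]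
  split_ifs with h1 <;> simp

lemma pvA_loop (t : List Char) : ∀ (counts : List Int) (res : Int) (mask : Nat) (hs : List Nat),
    (∀ c ∈ t, pvAJ c) → mask < 1024 → counts.length = 1024 →
    (∀ m < 1024, counts.getD m 0 = (hs.count m : Int)) →
    (t.foldl pvStepA (counts, res, mask)).2.1 = res + pvAC t hs mask := by
  induction t with
  | nil => intro counts res mask hs _ _ _ _; simp [pvAC]
  | cons c t ih =>
      intro counts res mask hs haj hmask hlen hcnt
      have hc : pvAJ c := haj c (List.mem_cons_self ..)
      have hb : pvBit c < 1024 := pvBit_lt c hc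
      have hm : mask ^^^ pvBit c < 1024 := pv_xor_lt _ _ hmask hb
      simp only [List.foldl_cons, pvStepA, pvAC]
      rw [PySem.List.foldl_add (List.range 10)
            (fun j => counts.getD ((mask ^^^ pvBit c) ^^^ (1 <<< j)) 0)
            (res + counts.getD (mask ^^^ pvBit c) 0)]
      rw [ih _ _ _ ((mask ^^^ pvBit c) :: hs)
            (fun c hc => haj c (List.mem_cons_of_mem _ hc)) hm
            (by simpa using hlen)
            ?newcnt]
      case newcnt =>
        intro m' hm'
        rw [pv_getD_set counts (mask ^^^ pvBit c) _ m' (by omega)]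
        split_ifs with h1
        · subst h1; rw [hcnt _ hm]; simp
        · rw [hcnt m' hm']; simp [h1]
      have hsum : ((List.range 10).map (fun j => counts.getD ((mask ^^^ pvBit c) ^^^ (1 <<< j)) 0)).sum
          = ((List.range 10).map (fun j => (hs.count ((mask ^^^ pvBit c) ^^^ (1 <<< j)) : Int))).sum := by
        congr 1
        refine List.map_congr_left (fun j hj => ?_)
        have hj10 : j < 10 := List.mem_range.mp hj
        have hsh : (1 : Nat) <<< j < 1024 := by
          rw [Nat.shiftLeft_eq, one_mul]
          calc 2 ^ j ≤ 2 ^ 9 := Nat.pow_le_pow_right (by norm_num) (by omega)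
            _ < 1024 := by norm_num
        exact hcnt _ (pv_xor_lt _ _ hm hsh)
      rw [hcnt _ hm, hsum]
      have := pv_count_phi hs (mask ^^^ pvBit c)
      linarith

lemma pvA_top (word : String) (h : ∀ c ∈ word.toList, pvAJ c) :
    wounderfulSubstrings word = pvAC word.toList [0] 0 := by
  unfold wounderfulSubstrings
  rw [pvA_loop word.toList _ 0 0 [0] h (by norm_num)
        (by rw [List.length_set, List.length_replicate]) ?init]
  · ring
  case init =>
    intro m hm
    rw [pv_getD_set (List.replicate 1024 0) 0 1 m (by rw [List.length_replicate]; omega)]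
    split_ifs with h1
    · subst h1; simp
    · rw [List.getD_eq_getElem?_getD, List.getElem?_replicate]
      simp [hm, h1]

lemma pvB_inner (l : List Char) : ∀ m (r : Int), (l.foldl pvStepB (m, r)).2 = r + pvG l m := by
  induction l with
  | nil => intro m r; simp [pvG]
  | cons c t ih =>
      intro m r
      simp only [List.foldl_cons, pvStepB, pvG, pvGood]
      rw [ih]
      split_ifs <;> ring

lemma pvB_outer (cs : List Char) : ∀ r : Int, (List.range cs.length).foldl (fun res i => ((cs.drop i).foldl pvStepB (0, res)).2) r = r + pvS cs := by
  induction cs with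
  | nil => intro r; simp [pvS]
  | cons c t ih =>
      intro r
      rw [show (c :: t).length = t.length + 1 from rfl, List.range_succ_eq_map]
      simp only [List.foldl_cons, List.foldl_map, List.drop_succ_cons, List.drop_zero]
      have e1 : (List.foldl pvStepB (pvStepB (0, r) c) t).2 = r + pvG (c :: t) 0 := by
        have := pvB_inner (c :: t) 0 r
        simpa using this
      rw [e1, ih (r + pvG (c :: t) 0), show pvS (c :: t) = pvG (c :: t) 0 + pvS t from rfl]
      ring

lemma pvB_top (word : String) : wounderfulSubstrings_alt word = pvS word.toList := by
  unfold wounderfulSubstrings_alt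
  rw [pvB_outer word.toList 0, zero_add]

-- ===== VERDICT (by name: the statement is the Claim_ definition above) =====
theorem wounderfulSubstrings_spec : Claim_equal_wounderfulSubstrings := by
  intro word _ hpre
  have haj : ∀ c ∈ word.toList, pvAJ c := (pvPre_iff word).mp hpre
  unfold Spec_wounderfulSubstrings
  rw [pvA_top word haj, pvB_top word, pvAC_eq_pvS word.toList haj]
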